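-- pv_equiv track=rewrite | github.com/lcarpino/Advent-of-Code | src/06.py | part2
-- ===== SOURCE A (Python) =====
-- def coord_bounds(coordinates):
--     x_coords, y_coords = zip(*coordinates)
--
--     xmin = min(x_coords)
--     xmax = max(x_coords)
--     ymin = min(y_coords)
--     ymax = max(y_coords)
--
--     return xmin, xmax, ymin, ymax
--
-- def L1_dist(p1, p2):
--     x1, y1 = p1
--     x2, y2 = p2
--     return abs(x1-x2) + abs(y1-y2)
--
-- def part2(coordinates, max_tot_dist):
--
--     xmin, xmax, ymin, ymax = coord_bounds(coordinates)
--     atlas = {}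
--
--     for x in range(xmin, xmax+1):
--         for y in range(ymin, ymax+1):
--             dist = sum((L1_dist((x,y), coord)
--                          for coord in coordinates))
--             if dist >= max_tot_dist:
--                 continue
--             atlas[x, y] = 1
--     return sum(atlas.values())
-- ===== SOURCE B (Python) =====
-- def part2(coordinates, max_tot_dist):
--     xs = [c[0] for c in coordinates]
--     ys = [c[1] for c in coordinates]
--     sx = [sum(abs(x - xi) for xi in xs) for x in range(min(xs), max(xs) + 1)]
--     sy = [sum(abs(y - yi) for yi in ys) for y in range(min(ys), max(ys) + 1)]
--     return sum(sum(1 for b in sy if a + b < max_tot_dist) for a in sx)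
-- ===== Notes on version B (the rewrite author's own statement) =====
-- stated objective: faster
-- what changed: Exploits separability of the L1 distance: per-column and per-row distance sums are precomputed once, and the grid count becomes a pair count over the two precomputed lists, removing the N-factor from the W*H grid scan; the redundant dict is replaced by direct counting.
import Mathlib
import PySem

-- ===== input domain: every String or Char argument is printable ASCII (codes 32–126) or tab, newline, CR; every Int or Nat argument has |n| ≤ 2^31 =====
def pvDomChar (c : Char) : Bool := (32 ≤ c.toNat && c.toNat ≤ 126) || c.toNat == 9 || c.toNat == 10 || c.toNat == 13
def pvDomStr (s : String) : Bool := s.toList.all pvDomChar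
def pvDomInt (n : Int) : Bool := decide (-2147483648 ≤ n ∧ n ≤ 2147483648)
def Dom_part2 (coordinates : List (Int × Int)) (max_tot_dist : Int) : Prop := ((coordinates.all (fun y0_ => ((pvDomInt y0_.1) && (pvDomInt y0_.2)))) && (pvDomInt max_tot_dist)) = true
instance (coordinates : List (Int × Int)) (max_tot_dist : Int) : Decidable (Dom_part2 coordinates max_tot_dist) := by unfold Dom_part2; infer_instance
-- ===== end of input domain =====

-- B replaces the W*H*N grid scan by separated per-column / per-row L1 distance sums and a pair count (faster, asymptotically).

-- ===== PORT A =====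
-- helper L1_dist
def pvL1dist (p1 p2 : Int × Int) : Int := |p1.1 - p2.1| + |p1.2 - p2.2|

-- helper coord_bounds; none = the ValueError/unpacking error Python raises on an empty list (excluded by Pre_)
def pvCoordBounds (coordinates : List (Int × Int)) : Option (Int × Int × Int × Int) :=
  let x_coords := coordinates.map (·.1)
  let y_coords := coordinates.map (·.2)
  match PySem.List.min? x_coords (fun v => v), PySem.List.max? x_coords (fun v => v),
        PySem.List.min? y_coords (fun v => v), PySem.List.max? y_coords (fun v => v) with
  | some xmin, some xmax, some ymin, some ymax => some (xmin, xmax, ymin, ymax)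
  | _, _, _, _ => none

def part2 (coordinates : List (Int × Int)) (max_tot_dist : Int) : Int :=
  match pvCoordBounds coordinates with
  | none => 0   -- unreachable under Pre_ (Python raises here)
  | some (xmin, xmax, ymin, ymax) =>
    let atlas : PySem.Dict (Int × Int) Int :=
      (PySem.List.pyRange xmin (xmax + 1) 1).foldl (fun d x =>
        (PySem.List.pyRange ymin (ymax + 1) 1).foldl (fun d y =>
          let dist := (coordinates.map (fun coord => pvL1dist (x, y) coord)).sum
          if dist ≥ max_tot_dist then d else d.insert (x, y) 1) d)
        PySem.Dict.empty
    atlas.values.sum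

-- ===== PORT B =====
-- helper: sum(abs(z - zi) for zi in zs)
def pvSumAbs (zs : List Int) (z : Int) : Int := (zs.map (fun zi => |z - zi|)).sum

def part2_alt (coordinates : List (Int × Int)) (max_tot_dist : Int) : Int :=
  let xs := coordinates.map (·.1)
  let ys := coordinates.map (·.2)
  match PySem.List.min? xs (fun v => v), PySem.List.max? xs (fun v => v),
        PySem.List.min? ys (fun v => v), PySem.List.max? ys (fun v => v) with
  | some xmin, some xmax, some ymin, some ymax =>
    let sx := (PySem.List.pyRange xmin (xmax + 1) 1).map (fun x => pvSumAbs xs x)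
    let sy := (PySem.List.pyRange ymin (ymax + 1) 1).map (fun y => pvSumAbs ys y)
    (sx.map (fun a => ((sy.countP (fun b => a + b < max_tot_dist)) : Int))).sum
  | _, _, _, _ => 0   -- unreachable under Pre_ (Python raises on the empty list)

-- ===== PRECONDITION & SPEC =====
-- Pre_ excludes only the empty list, on which Python A raises (unpacking zip(*[]) fails).
def Pre_part2 (coordinates : List (Int × Int)) (max_tot_dist : Int) : Prop := coordinates ≠ []
instance (coordinates : List (Int × Int)) (max_tot_dist : Int) : Decidable (Pre_part2 coordinates max_tot_dist) := by unfold Pre_part2; infer_instance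

def pvWitness_part2 : (List (Int × Int)) × Int := ([(0, 0), (2, 1)], 5)

def Spec_part2 (coordinates : List (Int × Int)) (max_tot_dist : Int) (out : Int) : Prop := out = part2_alt coordinates max_tot_dist
instance (coordinates : List (Int × Int)) (max_tot_dist : Int) (out : Int) : Decidable (Spec_part2 coordinates max_tot_dist out) := by unfold Spec_part2; infer_instance

-- ===== CLAIM (what is proved, stated in full; the proofs are below) =====
def Claim_equal_part2 : Prop := ∀ (coordinates : List (Int × Int)) (max_tot_dist : Int), Dom_part2 coordinates max_tot_dist → Pre_part2 coordinates max_tot_dist → Spec_part2 coordinates max_tot_dist (part2 coordinates max_tot_dist)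

-- ===== LEMMAS AND PROOFS =====

-- separability: the total L1 distance at (x, y) is the x-part plus the y-part
theorem pv_sep (coordinates : List (Int × Int)) (x y : Int) :
    (coordinates.map (fun coord => pvL1dist (x, y) coord)).sum
      = pvSumAbs (coordinates.map (·.1)) x + pvSumAbs (coordinates.map (·.2)) y := by
  simp only [pvSumAbs, pvL1dist, List.map_map]
  rw [PySem.List.sum_map_add_int]
  rfl

-- inner loop over y, for a fixed x whose keys are fresh in d: it appends the admissible pairs
theorem pv_inner (coordinates : List (Int × Int)) (M x ymin ymax : Int)
    (d : PySem.Dict (Int × Int) Int) (hfresh : ∀ p ∈ d.keys, p.1 ≠ x) :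
    ((PySem.List.pyRange ymin (ymax + 1) 1).foldl (fun d y =>
        let dist := (coordinates.map (fun coord => pvL1dist (x, y) coord)).sum
        if dist ≥ M then d else d.insert (x, y) 1) d).items
      = d.items ++ ((PySem.List.pyRange ymin (ymax + 1) 1).filter
          (fun y => decide ((coordinates.map (fun coord => pvL1dist (x, y) coord)).sum < M))).map
            (fun y => ((x, y), (1 : Int))) := by
  have hcongr : (PySem.List.pyRange ymin (ymax + 1) 1).foldl (fun d y =>
        let dist := (coordinates.map (fun coord => pvL1dist (x, y) coord)).sum
        if dist ≥ M then d else d.insert (x, y) 1) d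
      = (PySem.List.pyRange ymin (ymax + 1) 1).foldl (fun d y =>
        if (coordinates.map (fun coord => pvL1dist (x, y) coord)).sum < M
          then d.insert (x, y) 1 else d) d := by
    apply PySem.List.foldl_congr_mem
    intro acc z _
    dsimp only
    split_ifs with h1 h2 <;> first | rfl | omega
  rw [hcongr, PySem.List.foldl_ite_eq_foldl_filter]
  rw [PySem.Dict.items_foldl_insert_fresh (k := fun y => (x, y)) (v := fun _ => (1 : Int))]
  · intro a ha
    by_contra hc
    simp only [Bool.not_eq_false] at hc
    exact hfresh (x, a) ((PySem.Dict.contains_iff_mem_keys d (x, a)).mp hc) rfl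
  · have hnd : ((PySem.List.pyRange ymin (ymax + 1) 1).filter
        (fun y => decide ((coordinates.map (fun coord => pvL1dist (x, y) coord)).sum < M))).Nodup :=
      (PySem.List.nodup_pyRange_one ymin (ymax + 1)).filter _
    exact hnd.map (fun a b h => by injection h)

-- the outer loop over x: invariant on the accumulated dict
theorem pv_outer (coordinates : List (Int × Int)) (M ymin ymax : Int) (n : Nat) :
    ∀ (a : Int) (d : PySem.Dict (Int × Int) Int),
    (∀ p ∈ d.keys, p.1 < a) →
    ((PySem.List.pyRange a (a + n) 1).foldl (fun d x =>
        (PySem.List.pyRange ymin (ymax + 1) 1).foldl (fun d y =>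
          let dist := (coordinates.map (fun coord => pvL1dist (x, y) coord)).sum
          if dist ≥ M then d else d.insert (x, y) 1) d) d).items
      = d.items ++ (PySem.List.pyRange a (a + n) 1).flatMap (fun x =>
          ((PySem.List.pyRange ymin (ymax + 1) 1).filter
            (fun y => decide ((coordinates.map (fun coord => pvL1dist (x, y) coord)).sum < M))).map
              (fun y => ((x, y), (1 : Int)))) := by
  induction n with
  | zero =>
    intro a d _
    have h0 : a + ((0 : Nat) : Int) = a := by push_cast; ring
    rw [h0, PySem.List.pyRange_one_eq_nil (le_refl a)]
    simp
  | succ m ih =>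
    intro a d hinv
    have hab : a < a + ((m + 1 : Nat) : Int) := by push_cast; omega
    rw [PySem.List.pyRange_one_cons hab]
    simp only [List.foldl_cons, List.flatMap_cons]
    have hstep := pv_inner coordinates M a ymin ymax d (fun p hp => ne_of_lt (hinv p hp))
    have hkeynew : ∀ p ∈ ((PySem.List.pyRange ymin (ymax + 1) 1).foldl (fun d y =>
          let dist := (coordinates.map (fun coord => pvL1dist (a, y) coord)).sum
          if dist ≥ M then d else d.insert (a, y) 1) d).keys, p.1 < a + 1 := by
      intro p hp
      simp only [PySem.Dict.keys] at hp
      rw [hstep] at hp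
      simp only [List.map_append, List.mem_append, List.map_map] at hp
      rcases hp with h1 | h2
      · exact lt_trans (hinv p h1) (by omega)
      · obtain ⟨y, _, rfl⟩ := List.mem_map.mp h2
        show a < a + 1
        omega
    have harg : a + ((m + 1 : Nat) : Int) = (a + 1) + (m : Int) := by push_cast; ring
    rw [harg]
    rw [ih (a + 1) _ hkeynew]
    rw [hstep, List.append_assoc]

-- core identity: A's grid dict count equals B's separated pair count
theorem pv_count (coordinates : List (Int × Int)) (M xmin xmax ymin ymax : Int) :
    ((PySem.List.pyRange xmin (xmax + 1) 1).foldl (fun d x =>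
        (PySem.List.pyRange ymin (ymax + 1) 1).foldl (fun d y =>
          let dist := (coordinates.map (fun coord => pvL1dist (x, y) coord)).sum
          if dist ≥ M then d else d.insert (x, y) 1) d)
        PySem.Dict.empty).values.sum
    = (((PySem.List.pyRange xmin (xmax + 1) 1).map (fun x => pvSumAbs (coordinates.map (·.1)) x)).map
        (fun a => ((((PySem.List.pyRange ymin (ymax + 1) 1).map (fun y => pvSumAbs (coordinates.map (·.2)) y)).countP
          (fun b => a + b < M)) : Int))).sum := by
  rcases le_or_gt (xmax + 1) xmin with hle | hlt
  · rw [PySem.List.pyRange_one_eq_nil hle]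
    simp [PySem.Dict.values, PySem.Dict.empty]
  · have he : xmin + (((xmax + 1 - xmin).toNat : Nat) : Int) = xmax + 1 := by omega
    have houter := pv_outer coordinates M ymin ymax (xmax + 1 - xmin).toNat xmin
      PySem.Dict.empty (by intro p hp; simp [PySem.Dict.empty, PySem.Dict.keys] at hp)
    rw [he] at houter
    have hvals : (((PySem.List.pyRange xmin (xmax + 1) 1).foldl (fun d x =>
        (PySem.List.pyRange ymin (ymax + 1) 1).foldl (fun d y =>
          let dist := (coordinates.map (fun coord => pvL1dist (x, y) coord)).sum
          if dist ≥ M then d else d.insert (x, y) 1) d)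
        PySem.Dict.empty)).values
      = (PySem.List.pyRange xmin (xmax + 1) 1).flatMap (fun x =>
          ((PySem.List.pyRange ymin (ymax + 1) 1).filter
            (fun y => decide ((coordinates.map (fun coord => pvL1dist (x, y) coord)).sum < M))).map
              (fun _ => (1 : Int))) := by
      simp only [PySem.Dict.values]
      rw [houter]
      have h0 : (PySem.Dict.empty : PySem.Dict (Int × Int) Int).items = [] := rfl
      rw [h0, List.nil_append, List.map_flatMap]
      congr 1
      funext a
      rw [List.map_map]
      rfl
    rw [hvals, List.flatMap_def, List.sum_flatten, List.map_map, List.map_map]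
    congr 1
    apply List.map_congr_left
    intro x _
    simp only [Function.comp]
    rw [PySem.List.sum_map_const_int, List.countP_map, mul_one, ← List.countP_eq_length_filter]
    congr 1
    apply List.countP_congr
    intro y _
    simp only [Function.comp]
    rw [pv_sep]

-- ===== VERDICT (by name: the statement is the Claim_ definition above) =====
theorem part2_spec : Claim_equal_part2 := by
  intro coordinates M _ hpre
  unfold Spec_part2 part2 part2_alt pvCoordBounds
  rcases coordinates with _ | ⟨c, rest⟩
  · exact absurd rfl hpre
  simp only [List.map_cons, PySem.List.min?_id_cons, PySem.List.max?_id_cons]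
  exact pv_count (c :: rest) M _ _ _ _
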